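-- pv_equiv track=rewrite | github.com/y00281951/fst-time-nlu | src/english/time_parser.py | _should_merge_relative_with_utc
-- ===== SOURCE A (Python) =====
-- def _should_merge_relative_with_utc(utc_token_index, tokens):
--     """
--     Check if a time_utc token should be merged with the previous time_relative token.
--     Only merge if they are close enough (no significant content in between).
--
--     Args:
--         utc_token_index (int): Index of the time_utc token
--         tokens (list): List of all tokens
--
--     Returns:
--         bool: True if should merge, False otherwise
--     """
--     # Look backwards for the most recent time_relative token
--     for i in range(utc_token_index - 1, -1, -1):
--         token = tokens[i]
--         if token.get("type") == "time_relative":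
--             # Found the time_relative token
--             # Check if there are only empty tokens or simple connectors between them
--             gap_tokens = tokens[i + 1 : utc_token_index]
--
--             # Count non-empty, non-connector tokens
--             significant_tokens = 0
--             for gap_token in gap_tokens:
--                 if gap_token.get("type") == "token":
--                     value = gap_token.get("value", "").strip().lower()
--                     # Skip empty tokens and simple connectors
--                     if value and value not in [
--                         "at",
--                         "on",
--                         "in",
--                         "of",
--                         "the",
--                         "a",
--                         "an",
--                         "is",
--                         "was",
--                         "will",
--                         "be",
--                     ]:
--                         significant_tokens += 1
--                 elif gap_token.get("type", "").startswith("time_"):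
--                     # If there's another time token in between, don't merge
--                     return False
--
--             # Only merge if there are no significant tokens in between
--             return significant_tokens == 0
--
--         elif token.get("type", "").startswith("time_"):
--             # Found another time token before the relative, don't merge
--             return False
--
--     return False
-- ===== SOURCE B (Python) =====
-- _CONNECTORS = {"at", "on", "in", "of", "the", "a", "an", "is", "was", "will", "be"}
--
--
-- def _should_merge_relative_with_utc(utc_token_index, tokens):
--     """Single backward pass: count significant tokens while walking back; decide
--     immediately when the nearest time token is found."""
--     significant = 0
--     for i in range(utc_token_index - 1, -1, -1):
--         ttype = tokens[i].get("type", "")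
--         if ttype == "time_relative":
--             return significant == 0
--         if ttype.startswith("time_"):
--             return False
--         if ttype == "token":
--             value = tokens[i].get("value", "").strip().lower()
--             if value and value not in _CONNECTORS:
--                 significant += 1
--     return False
-- ===== Notes on version B (the rewrite author's own statement) =====
-- stated objective: simpler
-- what changed: Replaces A's find-the-relative-token backward scan followed by re-slicing the gap and a second counting loop (with a dead time_ branch) by a single backward pass that maintains a significant-token counter and decides as soon as the nearest time token is reached.
import Mathlib
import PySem

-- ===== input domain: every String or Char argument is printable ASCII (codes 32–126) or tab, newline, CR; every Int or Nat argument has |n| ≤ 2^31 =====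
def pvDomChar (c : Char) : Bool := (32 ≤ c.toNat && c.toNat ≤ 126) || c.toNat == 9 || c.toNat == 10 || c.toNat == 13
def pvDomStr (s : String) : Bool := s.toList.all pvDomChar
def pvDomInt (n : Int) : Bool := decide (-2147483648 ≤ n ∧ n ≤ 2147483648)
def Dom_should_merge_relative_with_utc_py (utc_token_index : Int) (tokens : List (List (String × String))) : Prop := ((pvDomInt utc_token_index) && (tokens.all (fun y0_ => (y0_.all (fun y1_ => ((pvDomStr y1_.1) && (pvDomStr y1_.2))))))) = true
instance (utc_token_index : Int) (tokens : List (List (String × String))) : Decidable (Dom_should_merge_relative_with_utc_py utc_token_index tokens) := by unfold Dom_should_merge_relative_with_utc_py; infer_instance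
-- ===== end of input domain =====

-- B replaces A's find-then-reslice-and-recount (two passes over the gap, with a dead inner time_ branch)
-- by one backward pass carrying a significant-token counter: simpler, same cost; return value only, no mutation.


-- ===== PORT A =====
-- the connector list literal of A's inner loop
def smrwuConnectors : List String :=
  ["at", "on", "in", "of", "the", "a", "an", "is", "was", "will", "be"]

-- A's inner loop over gap_tokens, carrying significant_tokens (returns False early on a time_ token)
def smrwuAGap : List (List (String × String)) → Int → Bool
  | [], sig => sig == 0
  | g :: rest, sig =>
    if List.lookup "type" g == some "token" then
      let value := PySem.Str.lower (PySem.Str.strip ((List.lookup "value" g).getD ""))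
      if value ≠ "" && !(smrwuConnectors.contains value) then smrwuAGap rest (sig + 1)
      else smrwuAGap rest sig
    else if PySem.Str.startswith ((List.lookup "type" g).getD "") "time_" then false
    else smrwuAGap rest sig

-- A's outer backward loop over the index list range(utc_token_index-1, -1, -1)
def smrwuALoop (tokens : List (List (String × String))) (utc : Int) : List Int → Bool
  | [] => false
  | i :: rest =>
    let token := (PySem.List.pyGet? tokens i).getD []
    if List.lookup "type" token == some "time_relative" then
      smrwuAGap (PySem.List.slice tokens (some (i + 1)) (some utc)) 0
    else if PySem.Str.startswith ((List.lookup "type" token).getD "") "time_" then false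
    else smrwuALoop tokens utc rest

def should_merge_relative_with_utc_py (utc_token_index : Int) (tokens : List (List (String × String))) : Bool :=
  smrwuALoop tokens utc_token_index (PySem.List.pyRange (utc_token_index - 1) (-1) (-1))

-- ===== PORT B =====
-- B's connector set
def smrwuConnectorSet : PySem.Set String :=
  PySem.Set.ofList ["at", "on", "in", "of", "the", "a", "an", "is", "was", "will", "be"]

-- B's single backward loop, carrying the significant counter
def smrwuBLoop (tokens : List (List (String × String))) : List Int → Int → Bool
  | [], _ => false
  | i :: rest, significant =>
    let ttype := (List.lookup "type" ((PySem.List.pyGet? tokens i).getD [])).getD ""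
    if ttype == "time_relative" then significant == 0
    else if PySem.Str.startswith ttype "time_" then false
    else if ttype == "token" then
      let value := PySem.Str.lower (PySem.Str.strip ((List.lookup "value" ((PySem.List.pyGet? tokens i).getD [])).getD ""))
      if value ≠ "" && !(PySem.Set.contains smrwuConnectorSet value) then smrwuBLoop tokens rest (significant + 1)
      else smrwuBLoop tokens rest significant
    else smrwuBLoop tokens rest significant

def should_merge_relative_with_utc_py_alt (utc_token_index : Int) (tokens : List (List (String × String))) : Bool :=
  smrwuBLoop tokens (PySem.List.pyRange (utc_token_index - 1) (-1) (-1)) 0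

-- ===== PRECONDITION & SPEC =====
-- Pre_ excludes exactly the inputs where Python A raises IndexError: tokens[utc_token_index-1] with utc_token_index-1 ≥ len(tokens).
def Pre_should_merge_relative_with_utc_py (utc_token_index : Int) (tokens : List (List (String × String))) : Prop :=
  utc_token_index ≤ (tokens.length : Int)
instance (utc_token_index : Int) (tokens : List (List (String × String))) : Decidable (Pre_should_merge_relative_with_utc_py utc_token_index tokens) := by unfold Pre_should_merge_relative_with_utc_py; infer_instance

def pvWitness_should_merge_relative_with_utc_py : Int × (List (List (String × String))) :=
  (2, [[("type", "time_relative"), ("value", "tomorrow")], [("type", "token"), ("value", "at")], [("type", "time_utc"), ("value", "5pm")]])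

def Spec_should_merge_relative_with_utc_py (utc_token_index : Int) (tokens : List (List (String × String))) (out : Bool) : Prop := out = should_merge_relative_with_utc_py_alt utc_token_index tokens
instance (utc_token_index : Int) (tokens : List (List (String × String))) (out : Bool) : Decidable (Spec_should_merge_relative_with_utc_py utc_token_index tokens out) := by unfold Spec_should_merge_relative_with_utc_py; infer_instance

-- ===== CLAIM (what is proved, stated in full; the proofs are below) =====
def Claim_equal_should_merge_relative_with_utc_py : Prop := ∀ (utc_token_index : Int) (tokens : List (List (String × String))), Dom_should_merge_relative_with_utc_py utc_token_index tokens → Pre_should_merge_relative_with_utc_py utc_token_index tokens → Spec_should_merge_relative_with_utc_py utc_token_index tokens (should_merge_relative_with_utc_py utc_token_index tokens)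

-- ===== LEMMAS AND PROOFS =====

-- a token is "significant" (counted by A's inner loop and by B)
def smrwuSig (g : List (String × String)) : Bool :=
  List.lookup "type" g == some "token" &&
  (let value := PySem.Str.lower (PySem.Str.strip ((List.lookup "value" g).getD ""))
   value ≠ "" && !(smrwuConnectors.contains value))

-- no token in the list has a type starting with "time_"
def smrwuNoTime (gs : List (List (String × String))) : Bool :=
  gs.all (fun g => !(PySem.Str.startswith ((List.lookup "type" g).getD "") "time_"))

-- B's set membership is A's list membership
theorem smrwuConnector_contains (v : String) :
    PySem.Set.contains smrwuConnectorSet v = smrwuConnectors.contains v := by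
  have h : smrwuConnectorSet = smrwuConnectors := by
    unfold smrwuConnectorSet smrwuConnectors
    apply PySem.Set.ofList_eq_self_of_nodup
    decide
  rw [PySem.Set.contains_eq_listContains, h]

-- A's gap loop on a time_-free list counts the significant tokens
theorem smrwuAGap_eq : ∀ (gs : List (List (String × String))) (sig : Int),
    smrwuNoTime gs = true →
    smrwuAGap gs sig = (sig + (gs.countP smrwuSig : Int) == 0) := by
  intro gs
  induction gs with
  | nil => intro sig _; simp [smrwuAGap]
  | cons g rest ih =>
    intro sig h
    simp only [smrwuNoTime, List.all_cons, Bool.and_eq_true] at h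
    have hrest : smrwuNoTime rest = true := h.2
    have hnostart : PySem.Str.startswith ((List.lookup "type" g).getD "") "time_" = false := by
      simpa using h.1
    by_cases ht : (List.lookup "type" g == some "token") = true
    · simp only [smrwuAGap, ht, if_true]
      by_cases hv : (PySem.Str.lower (PySem.Str.strip ((List.lookup "value" g).getD "")) ≠ "" && !(smrwuConnectors.contains (PySem.Str.lower (PySem.Str.strip ((List.lookup "value" g).getD ""))))) = true
      · simp only [hv, if_true]
        rw [ih (sig + 1) hrest]
        have hs : smrwuSig g = true := by
          simp only [smrwuSig, ht, Bool.true_and]; exact hv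
        rw [List.countP_cons, hs]
        have harith : sig + 1 + ((rest.countP smrwuSig : Nat) : Int)
            = sig + (((rest.countP smrwuSig + 1 : Nat) : Int)) := by push_cast; ring
        simp only [if_true]
        rw [harith]
      · simp only [hv]
        rw [ih sig hrest]
        have hs : smrwuSig g = false := by
          simp only [smrwuSig, ht, Bool.true_and]
          rwa [Bool.not_eq_true] at hv
        rw [List.countP_cons, hs]
        simp
    · simp only [smrwuAGap, ht, Bool.false_eq_true, if_false, hnostart]
      rw [ih sig hrest]
      have hs : smrwuSig g = false := by
        simp only [smrwuSig]
        rw [Bool.not_eq_true] at ht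
        rw [ht, Bool.false_and]
      rw [List.countP_cons, hs]
      simp

-- slice from a natural index n < utc ≤ len splits off tokens[n]
theorem smrwuSlice_cons (tokens : List (List (String × String))) (n : Nat) (utc : Int)
    (hn : (n : Int) < utc) (hu : utc ≤ (tokens.length : Int)) :
    PySem.List.slice tokens (some (n : Int)) (some utc) =
      tokens[n]'(by omega) :: PySem.List.slice tokens (some ((n : Int) + 1)) (some utc) := by
  have h1 : PySem.List.slice tokens (some (n : Int)) (some utc)
      = (tokens.drop n).take (utc.toNat - n) := by
    rw [PySem.List.slice_toNat tokens (by omega) (by omega)]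
    simp
  have h2 : PySem.List.slice tokens (some ((n : Int) + 1)) (some utc)
      = (tokens.drop (n + 1)).take (utc.toNat - (n + 1)) := by
    have : ((n : Int) + 1) = ((n + 1 : Nat) : Int) := by push_cast; ring
    rw [this, PySem.List.slice_toNat tokens (by omega) (by omega)]
    simp
  rw [h1, h2]
  have hlt : n < tokens.length := by omega
  rw [List.drop_eq_getElem_cons hlt]
  have : utc.toNat - n = (utc.toNat - (n + 1)) + 1 := by omega
  rw [this, List.take_succ_cons]

-- the main invariant: with sig = number of significant tokens in the already-scanned
-- region tokens[n:utc] (which contains no time_ token), the two loops agree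
theorem smrwuLoops_eq (tokens : List (List (String × String))) (utc : Int)
    (hu : utc ≤ (tokens.length : Int)) :
    ∀ (n : Nat) (sig : Int), (n : Int) ≤ utc →
      sig = ((PySem.List.slice tokens (some (n : Int)) (some utc)).countP smrwuSig : Int) →
      smrwuNoTime (PySem.List.slice tokens (some (n : Int)) (some utc)) = true →
      smrwuALoop tokens utc (PySem.List.pyRange ((n : Int) - 1) (-1) (-1)) =
        smrwuBLoop tokens (PySem.List.pyRange ((n : Int) - 1) (-1) (-1)) sig := by
  intro n
  induction n with
  | zero =>
    intro sig _ _ _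
    rw [PySem.List.pyRange_neg_one_eq_nil (by omega)]
    simp [smrwuALoop, smrwuBLoop]
  | succ m ih =>
    intro sig hle hsig hnt
    have hcons : PySem.List.pyRange (((m + 1 : Nat) : Int) - 1) (-1) (-1)
        = (m : Int) :: PySem.List.pyRange ((m : Int) - 1) (-1) (-1) := by
      have h1 : (((m + 1 : Nat) : Int) - 1) = (m : Int) := by push_cast; ring
      rw [h1, PySem.List.pyRange_neg_one_cons (by omega)]
    rw [hcons]
    have hm : (m : Int) < utc := by push_cast at hle; omega
    have hmlt : m < tokens.length := by omega
    have htok : (PySem.List.pyGet? tokens (m : Int)).getD [] = tokens[m] := by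
      rw [PySem.List.pyGet?_natCast]
      simp [List.getElem?_eq_getElem hmlt]
    have hsplit := smrwuSlice_cons tokens m utc hm hu
    have hcast : ((m + 1 : Nat) : Int) = (m : Int) + 1 := by push_cast; ring
    rw [hcast] at hsig hnt
    simp only [smrwuALoop, smrwuBLoop, htok]
    by_cases hrel : (List.lookup "type" tokens[m] == some "time_relative") = true
    · have hrel' : ((List.lookup "type" tokens[m]).getD "" == "time_relative") = true := by
        rw [beq_iff_eq] at hrel ⊢; rw [hrel]; rfl
      simp only [hrel, hrel', if_true]
      rw [smrwuAGap_eq _ _ hnt, ← hsig]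
      simp
    · rw [Bool.not_eq_true] at hrel
      by_cases hts : PySem.Str.startswith ((List.lookup "type" tokens[m]).getD "") "time_" = true
      · have hrel' : ((List.lookup "type" tokens[m]).getD "" == "time_relative") = false := by
          rw [Bool.eq_false_iff]
          intro hc
          rw [beq_iff_eq] at hc
          cases hlk : List.lookup "type" tokens[m] with
          | none =>
            rw [hlk] at hc
            simp only [Option.getD_none] at hc
            exact absurd hc (by decide)
          | some s =>
            rw [hlk] at hc
            simp only [Option.getD_some] at hc
            rw [hlk, hc] at hrel
            exact absurd hrel (by decide)
        simp only [hrel, hrel', Bool.false_eq_true, if_false, hts, if_true]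
      · -- neither time_relative nor time_: both loops continue
        rw [Bool.not_eq_true] at hts
        have hrel' : ((List.lookup "type" tokens[m]).getD "" == "time_relative") = false := by
          rw [Bool.eq_false_iff]
          intro hc
          rw [beq_iff_eq] at hc
          rw [hc] at hts
          exact absurd hts (by decide)
        simp only [hrel, hrel', hts, Bool.false_eq_true, if_false]
        have hnt' : smrwuNoTime (PySem.List.slice tokens (some (m : Int)) (some utc)) = true := by
          rw [hsplit]
          simp only [smrwuNoTime, List.all_cons, Bool.and_eq_true]
          exact ⟨by rw [hts]; rfl, hnt⟩
        have hcount : ((PySem.List.slice tokens (some (m : Int)) (some utc)).countP smrwuSig : Int)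
            = sig + (if smrwuSig tokens[m] then 1 else 0) := by
          rw [hsplit, List.countP_cons, hsig]
          by_cases hs : smrwuSig tokens[m] = true
          · simp only [hs, if_true]; push_cast; ring
          · rw [Bool.not_eq_true] at hs
            simp only [hs, Bool.false_eq_true, if_false]; push_cast; ring
        by_cases httok : ((List.lookup "type" tokens[m]).getD "" == "token") = true
        · have httok' : (List.lookup "type" tokens[m] == some "token") = true := by
            rw [beq_iff_eq] at httok ⊢
            cases hlk : List.lookup "type" tokens[m] with
            | none =>
              rw [hlk] at httok
              simp only [Option.getD_none] at httok
              exact absurd httok (by decide)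
            | some s =>
              rw [hlk] at httok
              simp only [Option.getD_some] at httok
              rw [httok]
          simp only [httok, if_true]
          rw [smrwuConnector_contains]
          by_cases hv : (PySem.Str.lower (PySem.Str.strip ((List.lookup "value" tokens[m]).getD "")) ≠ "" && !(smrwuConnectors.contains (PySem.Str.lower (PySem.Str.strip ((List.lookup "value" tokens[m]).getD ""))))) = true
          · simp only [hv, if_true]
            apply ih (sig + 1) (by omega)
            · rw [hcount]
              have hs : smrwuSig tokens[m] = true := by
                simp only [smrwuSig, httok', Bool.true_and]; exact hv
              rw [hs, if_pos rfl]
            · exact hnt'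
          · rw [Bool.not_eq_true] at hv
            simp only [hv, Bool.false_eq_true, if_false]
            apply ih sig (by omega)
            · rw [hcount]
              have hs : smrwuSig tokens[m] = false := by
                simp only [smrwuSig, httok', Bool.true_and]; exact hv
              rw [hs]
              simp
            · exact hnt'
        · rw [Bool.not_eq_true] at httok
          simp only [httok, Bool.false_eq_true, if_false]
          apply ih sig (by omega)
          · rw [hcount]
            have hs : smrwuSig tokens[m] = false := by
              simp only [smrwuSig]
              cases hlk : List.lookup "type" tokens[m] with
              | none => rfl
              | some s =>
                rw [hlk] at httok
                simp only [Option.getD_some] at httok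
                have : (some s == some "token") = false := by
                  rw [Bool.eq_false_iff]
                  intro hc
                  rw [beq_iff_eq, Option.some_inj] at hc
                  rw [hc] at httok
                  exact absurd httok (by decide)
                rw [this, Bool.false_and]
            rw [hs]
            simp
          · exact hnt'

-- ===== VERDICT (by name: the statement is the Claim_ definition above) =====
theorem should_merge_relative_with_utc_py_spec : Claim_equal_should_merge_relative_with_utc_py := by
  intro utc tokens _ hpre
  unfold Spec_should_merge_relative_with_utc_py
  unfold should_merge_relative_with_utc_py should_merge_relative_with_utc_py_alt
  by_cases hpos : 0 < utc
  · obtain ⟨n, rfl⟩ : ∃ n : Nat, utc = (n : Int) := ⟨utc.toNat, by omega⟩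
    have hempty : PySem.List.slice tokens (some (n : Int)) (some (n : Int)) = [] := by
      rw [PySem.List.slice_toNat tokens (by omega) (by omega)]
      simp
    exact (smrwuLoops_eq tokens (n : Int) hpre n 0 (by omega)
      (by rw [hempty]; simp) (by rw [hempty]; rfl))
  · rw [PySem.List.pyRange_neg_one_eq_nil (by omega)]
    rfl
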